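-- pv_equiv track=rewrite | github.com/LakshayGujjar/URL-SHORTNER | prototype_1.py | return_base_10
-- ===== SOURCE A (Python) =====
-- def return_base_10(str):
-- 	encoded = 0
-- 	base62_charset = "0123456789ABCDEFGHIJKLMNOPQRSTUVWXYZabcdefghijklmnopqrstuvwxyz"
--
-- 	temp = len(str) - 1
--
-- 	for i in str:
-- 		index = base62_charset.find(i);
-- 		encoded = encoded + (index*(62**temp))
-- 		temp = temp - 1
--
-- 	return encoded
-- ===== SOURCE B (Python) =====
-- def return_base_10(str):
-- 	base62_charset = "0123456789ABCDEFGHIJKLMNOPQRSTUVWXYZabcdefghijklmnopqrstuvwxyz"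
-- 	encoded = 0
-- 	for ch in str:
-- 		encoded = encoded * 62 + base62_charset.find(ch)
-- 	return encoded
-- ===== Notes on version B (the rewrite author's own statement) =====
-- stated objective: faster
-- what changed: Replaces per-character power computation 62**temp (and the decremented exponent counter) with Horner's rule encoded = encoded*62 + digit in a single left-to-right pass.
import Mathlib
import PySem

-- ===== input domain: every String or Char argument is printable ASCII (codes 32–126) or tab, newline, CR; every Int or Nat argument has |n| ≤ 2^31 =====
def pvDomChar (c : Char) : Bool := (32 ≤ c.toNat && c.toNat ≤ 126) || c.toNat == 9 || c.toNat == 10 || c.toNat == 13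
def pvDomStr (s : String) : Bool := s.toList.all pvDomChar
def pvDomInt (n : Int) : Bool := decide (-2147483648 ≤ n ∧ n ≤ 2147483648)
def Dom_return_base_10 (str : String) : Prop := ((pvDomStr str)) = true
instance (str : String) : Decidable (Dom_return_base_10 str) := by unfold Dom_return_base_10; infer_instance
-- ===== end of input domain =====

-- B replaces A's per-character 62**temp power computation with Horner's rule (one multiply-add per char): faster.


-- ===== PORT A =====
def pvCharset : List Char := "0123456789ABCDEFGHIJKLMNOPQRSTUVWXYZabcdefghijklmnopqrstuvwxyz".toList

-- state: (encoded, temp); 62 ** temp ported as 62 ^ temp.toNat — exact, since temp ≥ 0 whenever it is used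
def return_base_10 (str : String) : Int :=
  (str.toList.foldl
    (fun (st : Int × Int) c =>
      (st.1 + (PySem.Chars.find pvCharset [c]) * (62 : Int) ^ st.2.toNat, st.2 - 1))
    (0, PySem.Str.len str - 1)).1

-- ===== PORT B =====
def return_base_10_alt (str : String) : Int :=
  str.toList.foldl (fun e c => e * 62 + PySem.Chars.find pvCharset [c]) 0

-- ===== PRECONDITION & SPEC =====
def Spec_return_base_10 (str : String) (out : Int) : Prop := out = return_base_10_alt str
instance (str : String) (out : Int) : Decidable (Spec_return_base_10 str out) := by unfold Spec_return_base_10; infer_instance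

-- ===== CLAIM (what is proved, stated in full; the proofs are below) =====
def Claim_equal_return_base_10 : Prop := ∀ (str : String), Dom_return_base_10 str → Spec_return_base_10 str (return_base_10 str)

-- ===== LEMMAS AND PROOFS =====
-- positional value of a digit string, defined structurally
def pvVal : List Char → Int
  | [] => 0
  | c :: cs => (PySem.Chars.find pvCharset [c]) * (62 : Int) ^ cs.length + pvVal cs

theorem pvFoldA (cs : List Char) : ∀ e : Int,
    (cs.foldl
      (fun (st : Int × Int) c =>
        (st.1 + (PySem.Chars.find pvCharset [c]) * (62 : Int) ^ st.2.toNat, st.2 - 1))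
      (e, (cs.length : Int) - 1)).1 = e + pvVal cs := by
  induction cs with
  | nil => intro e; simp [pvVal]
  | cons c cs ih =>
    intro e
    have h1 : (((c :: cs).length : Int) - 1).toNat = cs.length := by
      simp
    have h2 : ((c :: cs).length : Int) - 1 - 1 = (cs.length : Int) - 1 := by
      simp
    simp only [List.foldl_cons, h1, h2]
    rw [ih]
    simp [pvVal, add_assoc]

theorem pvFoldB (cs : List Char) : ∀ e : Int,
    cs.foldl (fun e c => e * 62 + PySem.Chars.find pvCharset [c]) e
      = e * (62 : Int) ^ cs.length + pvVal cs := by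
  induction cs with
  | nil => intro e; simp [pvVal]
  | cons c cs ih =>
    intro e
    simp only [List.foldl_cons]
    rw [ih]
    simp [pvVal, pow_succ]
    ring

-- ===== VERDICT (by name: the statement is the Claim_ definition above) =====
theorem return_base_10_spec : Claim_equal_return_base_10 := by
  intro str _
  unfold Spec_return_base_10 return_base_10 return_base_10_alt
  rw [PySem.Str.len_eq, pvFoldA str.toList 0, pvFoldB str.toList 0]
  simp
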